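-- pv_equiv track=rewrite | github.com/MihaiAC/algorithms-and-data-structures | practice/Hackerrank/hr_count_triplets.py | countTriplets_r1
-- ===== SOURCE A (Python) =====
-- def countTriplets_r1(arr):
--     count_numbers = dict()
--
--     count = 0
--     for elem in arr:
--         if(elem in count_numbers):
--             if(count_numbers[elem] >= 2):
--                 count += count_numbers[elem] * (count_numbers[elem]-1) // 2
--             count_numbers[elem] += 1
--         else:
--             count_numbers[elem] = 1
--     return count
-- ===== SOURCE B (Python) =====
-- def countTriplets_r1(arr):
--     counts = {}
--     for x in arr:
--         counts[x] = counts.get(x, 0) + 1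
--     total = 0
--     for c in counts.values():
--         total += c * (c - 1) * (c - 2) // 6
--     return total
-- ===== Notes on version B (the rewrite author's own statement) =====
-- stated objective: simpler
-- what changed: A fuses counting with an incremental accumulation of triangular increments C(n,2) at each repeated element; B first builds the full occurrence table in one pass and then sums the closed form C(c,3) = c*(c-1)*(c-2)//6 over the distinct values' counts.
import Mathlib
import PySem

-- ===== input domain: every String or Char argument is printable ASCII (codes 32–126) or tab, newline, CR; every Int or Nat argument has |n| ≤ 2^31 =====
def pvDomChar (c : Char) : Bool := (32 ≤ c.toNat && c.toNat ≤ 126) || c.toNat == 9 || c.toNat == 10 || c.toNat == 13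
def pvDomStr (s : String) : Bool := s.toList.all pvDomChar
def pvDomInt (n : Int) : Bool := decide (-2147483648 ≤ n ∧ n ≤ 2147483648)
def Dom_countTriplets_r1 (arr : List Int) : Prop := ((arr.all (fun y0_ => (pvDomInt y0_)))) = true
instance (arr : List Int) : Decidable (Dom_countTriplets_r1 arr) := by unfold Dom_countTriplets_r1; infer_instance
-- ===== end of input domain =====

-- B replaces A's fused count-and-accumulate-C(n,2) loop with a count table built first,
-- then the closed form C(c,3) summed over the distinct values' counts (objective: simpler).

-- ===== PORT A =====
-- one iteration of A's loop body; state = (count_numbers, count)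
def pvStepA (s : PySem.Dict Int Int × Int) (elem : Int) : PySem.Dict Int Int × Int :=
  if s.1.contains elem then
    (s.1.insert elem (s.1.getD elem 0 + 1),
     if 2 ≤ s.1.getD elem 0 then
       s.2 + PySem.Int.floordiv (s.1.getD elem 0 * (s.1.getD elem 0 - 1)) 2
     else s.2)
  else
    (s.1.insert elem 1, s.2)

def countTriplets_r1 (arr : List Int) : Int :=
  (arr.foldl pvStepA (PySem.Dict.empty, 0)).2

-- ===== PORT B =====
def countTriplets_r1_alt (arr : List Int) : Int :=
  let counts : PySem.Dict Int Int :=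
    arr.foldl (fun d x => d.insert x (d.getD x 0 + 1)) PySem.Dict.empty
  counts.values.foldl
    (fun total c => total + PySem.Int.floordiv (c * (c - 1) * (c - 2)) 6) 0

-- ===== PRECONDITION & SPEC =====
def Spec_countTriplets_r1 (arr : List Int) (out : Int) : Prop := out = countTriplets_r1_alt arr
instance (arr : List Int) (out : Int) : Decidable (Spec_countTriplets_r1 arr out) := by unfold Spec_countTriplets_r1; infer_instance

-- ===== CLAIM (what is proved, stated in full; the proofs are below) =====
def Claim_equal_countTriplets_r1 : Prop := ∀ (arr : List Int), Dom_countTriplets_r1 arr → Spec_countTriplets_r1 arr (countTriplets_r1 arr)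

-- ===== LEMMAS AND PROOFS =====

-- C(n,3) and C(n,2) as the Python expressions compute them
def pvC3 (n : Int) : Int := PySem.Int.floordiv (n * (n - 1) * (n - 2)) 6
def pvC2 (n : Int) : Int := PySem.Int.floordiv (n * (n - 1)) 2

-- sum of pvC3 over a dict's values
def pvT (d : PySem.Dict Int Int) : Int := (d.values.map pvC3).sum

-- B's dict-building step
def pvInc (d : PySem.Dict Int Int) (x : Int) : PySem.Dict Int Int :=
  d.insert x (d.getD x 0 + 1)

lemma pv_two_dvd (k : Int) : (2:Int) ∣ k * (k - 1) := by
  have h : k % 2 = 0 ∨ k % 2 = 1 := by omega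
  obtain ⟨q, hq⟩ : ∃ q, k = 2 * q + k % 2 := ⟨k / 2, by omega⟩
  rcases h with h | h <;> rw [h] at hq <;> subst hq
  · exact ⟨q * (2 * q + 0 - 1), by ring⟩
  · exact ⟨(2 * q + 1) * q, by ring⟩

lemma pv_six_dvd (k : Int) : (6:Int) ∣ k * (k - 1) * (k - 2) := by
  have h : k % 6 = 0 ∨ k % 6 = 1 ∨ k % 6 = 2 ∨ k % 6 = 3 ∨ k % 6 = 4 ∨ k % 6 = 5 := by omega
  obtain ⟨q, hq⟩ : ∃ q, k = 6 * q + k % 6 := ⟨k / 6, by omega⟩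
  rcases h with h | h | h | h | h | h <;> rw [h] at hq <;> subst hq
  · exact ⟨q * (6 * q + 0 - 1) * (6 * q + 0 - 2), by ring⟩
  · exact ⟨(6 * q + 1) * q * (6 * q + 1 - 2), by ring⟩
  · exact ⟨(3 * q + 1) * (6 * q + 2 - 1) * (2 * q), by ring⟩
  · exact ⟨(2 * q + 1) * (3 * q + 1) * (6 * q + 1), by ring⟩
  · exact ⟨(3 * q + 2) * (2 * q + 1) * (6 * q + 4 - 2), by ring⟩
  · exact ⟨(6 * q + 5) * (3 * q + 2) * (2 * q + 1), by ring⟩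

lemma pv_floordiv_exact (a b q : Int) (hb : 0 < b) (h : a = b * q) :
    PySem.Int.floordiv a b = q := by
  rw [PySem.Int.floordiv_eq_ediv_of_pos hb, h, Int.mul_ediv_cancel_left q (by omega)]

-- the key telescoping identity: C(n+1,3) - C(n,3) = C(n,2), for every integer n
lemma pvC3_succ_sub (n : Int) : pvC3 (n + 1) - pvC3 n = pvC2 n := by
  obtain ⟨u, hu⟩ := pv_six_dvd n
  obtain ⟨w, hw⟩ := pv_six_dvd (n + 1)
  obtain ⟨v, hv⟩ := pv_two_dvd n
  have hwv : (n + 1) * (n + 1 - 1) * (n + 1 - 2) = 6 * w := hw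
  have h6 : 6 * (w - u - v) = 0 := by linear_combination -hw + hu + 3 * hv
  have hC3n : pvC3 n = u := pv_floordiv_exact _ _ _ (by norm_num) hu
  have hC3s : pvC3 (n + 1) = w := pv_floordiv_exact _ _ _ (by norm_num) hwv
  have hC2 : pvC2 n = v := pv_floordiv_exact _ _ _ (by norm_num) hv
  rw [hC3n, hC3s, hC2]; omega

-- replacing the unique item with key x by (x, n+1) adds pvC3 (n+1) - pvC3 n to the sum
lemma pv_sum_replace (l : List (Int × Int)) (x n : Int)
    (hnd : (l.map Prod.fst).Nodup) (hm : (x, n) ∈ l) :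
    ((l.map (fun p => if p.1 == x then (x, n + 1) else p)).map (fun p => pvC3 p.2)).sum
      = ((l.map (fun p => pvC3 p.2)).sum) + (pvC3 (n + 1) - pvC3 n) := by
  induction l with
  | nil => simp at hm
  | cons p t ih =>
    simp only [List.map_cons, List.nodup_cons, List.mem_map] at hnd
    rcases List.mem_cons.mp hm with rfl | hmt
    · simp only [List.map_cons, List.sum_cons, beq_self_eq_true, if_pos]
      have ht : t.map (fun p => if p.1 == x then (x, n + 1) else p) = t := by
        refine (List.map_congr_left ?_).trans (List.map_id t)
        intro q hq
        have hqx : q.1 ≠ x := fun h => hnd.1 ⟨q, hq, h⟩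
        simp [hqx]
      rw [ht]; ring
    · have hx : x ∈ t.map Prod.fst := List.mem_map.mpr ⟨(x, n), hmt, rfl⟩
      have hp : p.1 ≠ x := fun h => hnd.1 ⟨(x, n), hmt, by rw [h]⟩
      rw [List.map_cons, List.map_cons, List.map_cons, List.sum_cons, List.sum_cons,
        if_neg (by simpa using hp), ih hnd.2 hmt]
      ring

-- small values: pvC2 0 = pvC2 1 = 0, pvC3 1 = 0
lemma pvC2_small (n : Int) (h0 : 0 ≤ n) (h2 : ¬ 2 ≤ n) : pvC2 n = 0 := by
  interval_cases n <;> decide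

-- A's loop, from an arbitrary well-formed state, computes c plus the increase of pvT
lemma pv_loopA (xs : List Int) : ∀ (d : PySem.Dict Int Int) (c : Int),
    d.keys.Nodup → (∀ v ∈ d.values, 0 ≤ v) →
    (xs.foldl pvStepA (d, c)).2 = c + pvT (xs.foldl pvInc d) - pvT d := by
  induction xs with
  | nil => intro d c _ _; simp
  | cons x t ih =>
    intro d c hnd hval
    by_cases hc : d.contains x = true
    · -- x already counted: n = d[x] ≥ 0
      obtain ⟨n, hn⟩ : ∃ n, d.get? x = some n := by
        have := PySem.Dict.contains_eq_isSome_get? d x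
        rw [hc] at this
        exact Option.isSome_iff_exists.mp this.symm
      have hgd : d.getD x 0 = n := PySem.Dict.getD_of_get?_eq_some d 0 hn
      have hmem : (x, n) ∈ d.items := PySem.Dict.mem_items_of_get?_eq_some d hn
      have hnval : n ∈ d.values := by
        simp only [PySem.Dict.values]
        exact List.mem_map.mpr ⟨(x, n), hmem, rfl⟩
      have hn0 : 0 ≤ n := hval n hnval
      have hstep : pvStepA (d, c) x =
          (d.insert x (n + 1), c + pvC2 n) := by
        simp only [pvStepA, hc, if_pos, hgd]
        congr 1
        by_cases h2 : 2 ≤ n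
        · simp [h2, pvC2]
        · simp [h2, pvC2_small n hn0 h2]
      have hTins : pvT (d.insert x (n + 1)) = pvT d + (pvC3 (n + 1) - pvC3 n) := by
        simp only [pvT, PySem.Dict.values,
          PySem.Dict.items_insert_of_contains d (n + 1) hc]
        exact (by simpa using pv_sum_replace d.items x n hnd hmem)
      have hinc : pvInc d x = d.insert x (n + 1) := by
        simp [pvInc, hgd]
      have hIH := ih (d.insert x (n + 1)) (c + pvC2 n)
        (PySem.Dict.nodup_keys_insert d x (n + 1) hnd)
        (by
          intro v hv
          rcases PySem.Dict.mem_values_insert d x (n + 1) v hv with rfl | hv'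
          · omega
          · exact hval v hv')
      simp only [List.foldl_cons, hstep, hinc, hIH, hTins, pvC3_succ_sub]
      ring
    · -- new key: d[x] = 1
      have hc' : d.contains x = false := by simpa using hc
      have hstep : pvStepA (d, c) x = (d.insert x 1, c) := by
        simp [pvStepA, hc']
      have hinc : pvInc d x = d.insert x 1 := by
        simp [pvInc, PySem.Dict.getD_of_not_contains d 0 hc']
      have hTins : pvT (d.insert x 1) = pvT d := by
        simp only [pvT, PySem.Dict.values,
          PySem.Dict.items_insert_of_not_contains d 1 hc']
        simp [pvC3]
      have hIH := ih (d.insert x 1) c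
        (PySem.Dict.nodup_keys_insert d x 1 hnd)
        (by
          intro v hv
          rcases PySem.Dict.mem_values_insert d x 1 v hv with rfl | hv'
          · omega
          · exact hval v hv')
      simp only [List.foldl_cons, hstep, hinc, hIH, hTins]

-- ===== VERDICT (by name: the statement is the Claim_ definition above) =====
theorem countTriplets_r1_spec : Claim_equal_countTriplets_r1 := by
  intro arr _
  unfold Spec_countTriplets_r1 countTriplets_r1 countTriplets_r1_alt
  have h := pv_loopA arr PySem.Dict.empty 0
    (by simp [pysem]) (by simp [PySem.Dict.values, PySem.Dict.empty])
  have hB := PySem.List.foldl_add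
    ((arr.foldl (fun d x => d.insert x (d.getD x 0 + 1)) PySem.Dict.empty).values)
    (fun c => PySem.Int.floordiv (c * (c - 1) * (c - 2)) 6) 0
  have hT : pvT (arr.foldl pvInc PySem.Dict.empty) =
      ((arr.foldl (fun d x => d.insert x (d.getD x 0 + 1)) PySem.Dict.empty).values.map
        (fun c => PySem.Int.floordiv (c * (c - 1) * (c - 2)) 6)).sum := rfl
  have hTe : pvT PySem.Dict.empty = 0 := rfl
  rw [h, hT, hTe, hB]
  ring
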